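-- pv_equiv track=rewrite | github.com/markscottwright/distinguishedname | distinguishedname.py | _name_and_attribute_to_string
-- ===== SOURCE A (Python) =====
-- import string
--
-- def _name_and_attribute_to_string(n):
--     value_position = n.index('=') + 1
--
--     last_non_space_position = len(n) - 1
--     while n[last_non_space_position] == ' ':
--         last_non_space_position -= 1
--
--     out = n[0:value_position]
--     char_seen = False
--     for p in range(value_position, last_non_space_position + 1):
--         if n[p] == ' ' and not char_seen:
--             out += r"\20";
--         else:
--             char_seen = True
--             if n[p] in r'"+,;\<>=':
--                 out += "\\" + n[p]
--             elif n[p] in string.printable: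
--                 out += n[p]
--             else:
--                 out += "\\02x" % ord(n[p])
--
--     out += "\\20" * (len(n) - last_non_space_position - 1)
--     return out
-- ===== SOURCE B (Python) =====
-- def _name_and_attribute_to_string(n):
--     value_position = n.index('=') + 1
--     prefix = n[:value_position]
--     v = n[value_position:]
--     stripped = v.rstrip(' ')
--     core = stripped.lstrip(' ')
--     lead = len(stripped) - len(core)
--     trail = len(v) - len(stripped)
--     parts = [prefix, "\\20" * lead]
--     for c in core:
--         if c in r'"+,;\<>=':
--             parts.append("\\" + c)
--         else:
--             parts.append(c)
--     parts.append("\\20" * trail)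
--     return "".join(parts)
-- ===== Notes on version B (the rewrite author's own statement) =====
-- stated objective: alternative
-- what changed: Replaces A's single stateful char_seen pass (plus backward while-loop and trailing fixup) by a region decomposition: rstrip/lstrip split the value into leading-space run, core and trailing-space run, each rendered independently and joined; Pre_ excludes the separator-less inputs on which both A and B raise ValueError.
import Mathlib
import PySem

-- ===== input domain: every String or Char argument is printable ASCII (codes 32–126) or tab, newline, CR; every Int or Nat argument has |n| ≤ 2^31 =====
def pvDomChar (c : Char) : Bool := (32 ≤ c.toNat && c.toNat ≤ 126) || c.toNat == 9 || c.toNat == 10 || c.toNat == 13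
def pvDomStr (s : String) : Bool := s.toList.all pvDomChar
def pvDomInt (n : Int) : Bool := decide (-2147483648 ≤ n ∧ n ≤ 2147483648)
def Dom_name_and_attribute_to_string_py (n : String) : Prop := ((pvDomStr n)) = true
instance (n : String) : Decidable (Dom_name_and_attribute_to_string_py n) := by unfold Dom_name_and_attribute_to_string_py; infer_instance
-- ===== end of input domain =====

-- B replaces A's single stateful char_seen scan by an rstrip/lstrip region decomposition
-- (prefix, leading-space run, core, trailing-space run), joined at the end; same results.

-- ===== PORT A =====
-- the literal r"\20"
def pvEsc20 : List Char := ['\\', '2', '0']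
-- the literal r'"+,;\<>='
def pvSpecials : List Char := ['"', '+', ',', ';', '\\', '<', '>', '=']
-- Python's string.printable
def pvPrintable : List Char :=
  "0123456789abcdefghijklmnopqrstuvwxyzABCDEFGHIJKLMNOPQRSTUVWXYZ!\"#$%&'()*+,-./:;<=>?@[\\]^_`{|}~ \t\n\r".toList
    ++ [Char.ofNat 11, Char.ofNat 12]

-- the 'while n[last_non_space_position] == " "' loop of A (decrementing index)
def aLastNonSpace (cs : List Char) : Nat → Nat
  | 0 => 0
  | i + 1 => if cs.getD (i + 1) '=' = ' ' then aLastNonSpace cs i else i + 1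

-- the body of A's for-loop, on state (out, char_seen) and the current character
def aStepChar (st : List Char × Bool) (c : Char) : List Char × Bool :=
  if c = ' ' ∧ st.2 = false then (st.1 ++ pvEsc20, st.2)
  else if c ∈ pvSpecials then (st.1 ++ ['\\', c], true)
  else if c ∈ pvPrintable then (st.1 ++ [c], true)
  else (st.1, true)  -- Python raises TypeError here; unreachable on Dom (every Dom char is in string.printable)

def name_and_attribute_to_string_py (n : String) : String :=
  let cs := n.toList
  match PySem.List.index? cs '=' with
  | none => ""   -- Python: n.index('=') raises ValueError; excluded by Pre_
  | some i =>
    let valuePosition := i + 1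
    let lastNonSpace := aLastNonSpace cs (cs.length - 1)
    let st := (List.range' valuePosition (lastNonSpace + 1 - valuePosition)).foldl
        (fun st p => aStepChar st (cs.getD p ' ')) (cs.take valuePosition, false)
    String.mk (st.1 ++ (List.replicate (cs.length - lastNonSpace - 1) pvEsc20).flatten)

-- ===== PORT B =====
def escAlt (c : Char) : List Char := if c ∈ pvSpecials then ['\\', c] else [c]

def name_and_attribute_to_string_py_alt (n : String) : String :=
  let cs := n.toList
  match PySem.List.index? cs '=' with
  | none => ""   -- Python: n.index('=') raises ValueError; excluded by Pre_
  | some i =>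
    let pre := cs.take (i + 1)
    let v := cs.drop (i + 1)
    -- v.rstrip(' ') and .lstrip(' '), ported exactly as reverse/dropWhile on the char list
    let stripped := (v.reverse.dropWhile (· = ' ')).reverse
    let core := stripped.dropWhile (· = ' ')
    let lead := stripped.length - core.length
    let trail := v.length - stripped.length
    String.mk (pre ++ (List.replicate lead pvEsc20).flatten
      ++ core.flatMap escAlt ++ (List.replicate trail pvEsc20).flatten)

-- ===== PRECONDITION & SPEC =====
-- Pre_ excludes exactly the inputs without '=' where A raises ValueError (B raises there too).
def Pre_name_and_attribute_to_string_py (n : String) : Prop := '=' ∈ n.toList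
instance (n : String) : Decidable (Pre_name_and_attribute_to_string_py n) := by
  unfold Pre_name_and_attribute_to_string_py; infer_instance
def pvWitness_name_and_attribute_to_string_py : String := "cn= a b "

def Spec_name_and_attribute_to_string_py (n : String) (out : String) : Prop := out = name_and_attribute_to_string_py_alt n
instance (n : String) (out : String) : Decidable (Spec_name_and_attribute_to_string_py n out) := by unfold Spec_name_and_attribute_to_string_py; infer_instance

-- ===== CLAIM (what is proved, stated in full; the proofs are below) =====
def Claim_equal_name_and_attribute_to_string_py : Prop := ∀ (n : String), Dom_name_and_attribute_to_string_py n → Pre_name_and_attribute_to_string_py n → Spec_name_and_attribute_to_string_py n (name_and_attribute_to_string_py n)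

-- ===== LEMMAS AND PROOFS =====

lemma pv_take_at (pre suf : List Char) (c : Char) :
    (pre ++ c :: suf).take (pre.length + 1) = pre ++ [c] := by
  induction pre with
  | nil => simp
  | cons a l ih => simp [ih]

lemma pv_drop_at (pre suf : List Char) (c : Char) :
    (pre ++ c :: suf).drop (pre.length + 1) = suf := by
  induction pre with
  | nil => simp
  | cons a l ih => simpa using ih

set_option maxRecDepth 40000 in
lemma pv_dom_printable (c : Char) (h : pvDomChar c = true) : c ∈ pvPrintable := by
  have h127 : c.toNat < 127 := by
    simp only [pvDomChar, Bool.or_eq_true, Bool.and_eq_true, decide_eq_true_eq, beq_iff_eq] at h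
    omega
  have key : ∀ m : Fin 127,
      ((32 ≤ m.val && m.val ≤ 126) || m.val == 9 || m.val == 10 || m.val == 13) = true →
      Char.ofNat m.val ∈ pvPrintable := by decide
  have := key ⟨c.toNat, h127⟩ (by simpa [pvDomChar] using h)
  simpa [Char.ofNat_toNat] using this

lemma pv_head?_dropWhile (l : List Char) : (l.dropWhile (· = ' ')).head? ≠ some ' ' := by
  induction l with
  | nil => simp
  | cons c l ih =>
    by_cases hc : c = ' '
    · simpa [hc] using ih
    · simp [List.dropWhile_cons, hc]

lemma pv_takeWhile_replicate (l : List Char) :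
    l.takeWhile (· = ' ') = List.replicate (l.takeWhile (· = ' ')).length ' ' := by
  apply List.eq_replicate_of_mem
  intro b hb
  have := List.mem_takeWhile_imp hb
  simpa using this

lemma pv_lastNonSpace (u : List Char) (M : Nat) (hu : u ≠ []) (hl : u.getLast? ≠ some ' ') :
    ∀ m, m ≤ M → aLastNonSpace (u ++ List.replicate M ' ') (u.length - 1 + m) = u.length - 1 := by
  have hlen : 1 ≤ u.length := List.length_pos_iff.mpr hu
  intro m
  induction m with
  | zero =>
    intro _
    rw [Nat.add_zero]
    rcases h : u.length - 1 with _ | j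
    · simp [aLastNonSpace]
    · have hj : j + 1 < u.length := by omega
      obtain ⟨a, ha⟩ := Option.isSome_iff_exists.mp (List.getLast?_isSome.mpr hu)
      have ha' : a ≠ ' ' := fun he => hl (he ▸ ha)
      have h1 : (u ++ List.replicate M ' ')[j + 1]? = some a := by
        rw [List.getElem?_append_left hj, show j + 1 = u.length - 1 from h.symm,
          ← List.getLast?_eq_getElem?, ha]
      have hne : (u ++ List.replicate M ' ').getD (j + 1) '=' ≠ ' ' := by
        simp [List.getD, h1, ha']
      rw [aLastNonSpace, if_neg hne]
  | succ m ih =>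
    intro hm
    have hget : (u ++ List.replicate M ' ').getD (u.length - 1 + m + 1) '=' = ' ' := by
      have hidx : u.length - 1 + m + 1 = u.length + m := by omega
      rw [hidx]
      have : (u ++ List.replicate M ' ')[u.length + m]? = (List.replicate M ' ')[m]? := by
        rw [List.getElem?_append_right (by omega)]
        congr 1; omega
      simp [List.getD, this, List.getElem?_replicate, Nat.lt_of_succ_le hm]
    show aLastNonSpace (u ++ List.replicate M ' ') ((u.length - 1 + m) + 1) = u.length - 1
    rw [aLastNonSpace, if_pos hget]
    exact ih (Nat.le_of_succ_le hm)

lemma pv_foldl_range' {σ : Type} (g : σ → Char → σ) (cs : List Char) :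
    ∀ (l t : List Char) (s : Nat) (acc : σ), cs.drop s = l ++ t →
    (List.range' s l.length).foldl (fun st p => g st (cs.getD p ' ')) acc = l.foldl g acc := by
  intro l
  induction l with
  | nil => intro t s acc _; simp
  | cons a l ih =>
    intro t s acc h
    have hrange : List.range' s (l.length + 1) = s :: List.range' (s + 1) l.length := rfl
    have hget : cs.getD s ' ' = a := by
      have h0 : (cs.drop s)[0]? = cs[s]? := by
        rw [List.getElem?_drop]; simp
      rw [h] at h0
      simp at h0
      simp [List.getD, ← h0]
    have hdrop : cs.drop (s + 1) = l ++ t := by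
      have : cs.drop (s + 1) = (cs.drop s).drop 1 := by
        rw [List.drop_drop]
      rw [this, h]
      simp
    simp only [List.length_cons, hrange, List.foldl_cons, hget]
    exact ih t (s + 1) (g acc a) hdrop

lemma pv_foldl_seen (l : List Char) : ∀ acc : List Char, (∀ c ∈ l, c ∈ pvPrintable) →
    l.foldl aStepChar (acc, true) = (acc ++ l.flatMap escAlt, true) := by
  induction l with
  | nil => intro acc _; simp
  | cons c l ih =>
    intro acc h
    have hstep : aStepChar (acc, true) c = (acc ++ escAlt c, true) := by
      by_cases hc : c ∈ pvSpecials
      · simp [aStepChar, escAlt, hc]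
      · simp [aStepChar, escAlt, hc, h c (List.mem_cons_self)]
    rw [List.foldl_cons, hstep, ih (acc ++ escAlt c) (fun x hx => h x (List.mem_cons_of_mem _ hx))]
    simp

lemma pv_foldl_unseen : ∀ (lead : Nat) (core : List Char) (acc : List Char),
    core.head? ≠ some ' ' → (∀ c ∈ core, c ∈ pvPrintable) →
    ((List.replicate lead ' ' ++ core).foldl aStepChar (acc, false)).1
      = acc ++ (List.replicate lead pvEsc20).flatten ++ core.flatMap escAlt := by
  intro lead
  induction lead with
  | zero =>
    intro core acc hh hp
    cases core with
    | nil => simp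
    | cons c l =>
      have hc : c ≠ ' ' := by intro he; exact hh (by simp [he])
      have hstep : aStepChar (acc, false) c = (acc ++ escAlt c, true) := by
        by_cases hs : c ∈ pvSpecials
        · simp [aStepChar, escAlt, hc, hs]
        · simp [aStepChar, escAlt, hc, hs, hp c (List.mem_cons_self)]
      simp only [List.replicate, List.nil_append, List.foldl_cons, hstep]
      rw [pv_foldl_seen l (acc ++ escAlt c) (fun x hx => hp x (List.mem_cons_of_mem _ hx))]
      simp
  | succ m ih =>
    intro core acc hh hp
    have : List.replicate (m + 1) ' ' ++ core = ' ' :: (List.replicate m ' ' ++ core) := rfl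
    rw [this, List.foldl_cons]
    have hstep : aStepChar (acc, false) ' ' = (acc ++ pvEsc20, false) := by
      simp [aStepChar]
    rw [hstep, ih core (acc ++ pvEsc20) hh hp]
    simp [List.replicate_succ]

lemma pv_getLast_cons (c : Char) (l : List Char) (hc : c ≠ ' ') (hl : l.getLast? ≠ some ' ') :
    (c :: l).getLast? ≠ some ' ' := by
  cases l with
  | nil => simpa using hc
  | cons b m => rw [List.getLast?_cons_cons]; exact hl

lemma pv_getLast_append (pre l : List Char) (hne : l ≠ []) (hl : l.getLast? ≠ some ' ') :
    (pre ++ l).getLast? ≠ some ' ' := by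
  rw [List.getLast?_append]
  obtain ⟨a, ha⟩ := Option.isSome_iff_exists.mp (List.getLast?_isSome.mpr hne)
  rw [ha] at hl ⊢
  simpa using hl

-- ===== VERDICT (by name: the statement is the Claim_ definition above) =====
theorem name_and_attribute_to_string_py_spec : Claim_equal_name_and_attribute_to_string_py := by
  intro n hDom hPre
  unfold Spec_name_and_attribute_to_string_py
  unfold Pre_name_and_attribute_to_string_py at hPre
  have hidx : (PySem.List.index? n.toList '=').isSome := (PySem.List.index?_isSome_iff _ _).mpr hPre
  obtain ⟨k, hk⟩ := Option.isSome_iff_exists.mp hidx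
  obtain ⟨pre, suf, hcs, hklen, _⟩ := (PySem.List.index?_eq_some_iff _ _ _).mp hk
  have hprint : ∀ c ∈ n.toList, c ∈ pvPrintable := by
    intro c hc
    exact pv_dom_printable c (by
      have := hDom
      unfold Dom_name_and_attribute_to_string_py pvDomStr at this
      exact List.all_eq_true.mp this c hc)
  have htake : n.toList.take (k + 1) = pre ++ ['='] := by
    rw [hcs, ← hklen]; exact pv_take_at pre suf '='
  have hdrop : n.toList.drop (k + 1) = suf := by
    rw [hcs, ← hklen]; exact pv_drop_at pre suf '='
  -- unfold both ports
  simp only [name_and_attribute_to_string_py, name_and_attribute_to_string_py_alt, hk, htake, hdrop]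
  -- region decomposition of the value part
  set str : List Char := (suf.reverse.dropWhile (· = ' ')).reverse with hstr
  set core : List Char := str.dropWhile (· = ' ') with hcore
  obtain ⟨M, hsufsplit⟩ : ∃ M, suf = str ++ List.replicate M ' ' := by
    refine ⟨(suf.reverse.takeWhile (· = ' ')).length, ?_⟩
    conv_lhs => rw [← List.reverse_reverse suf,
      ← List.takeWhile_append_dropWhile (p := (· = ' ')) (l := suf.reverse)]
    rw [List.reverse_append, pv_takeWhile_replicate suf.reverse]
    simp [hstr]
  have hsuflen : suf.length = str.length + M := by rw [hsufsplit]; simp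
  have hstrlast : str.getLast? ≠ some ' ' := by
    rw [← List.head?_reverse, hstr, List.reverse_reverse]
    exact pv_head?_dropWhile _
  obtain ⟨lead, hstrsplit⟩ : ∃ lead, str = List.replicate lead ' ' ++ core := by
    refine ⟨(str.takeWhile (· = ' ')).length, ?_⟩
    conv_lhs => rw [← List.takeWhile_append_dropWhile (p := (· = ' ')) (l := str)]
    rw [pv_takeWhile_replicate str, hcore]
    simp
  have hstrlen : str.length = lead + core.length := by rw [hstrsplit]; simp
  have hcorehead : core.head? ≠ some ' ' := by rw [hcore]; exact pv_head?_dropWhile _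
  have hcoreprint : ∀ c ∈ core, c ∈ pvPrintable := by
    intro c hc
    apply hprint
    rw [hcs]
    have h1 : c ∈ str := by rw [hcore] at hc; exact List.dropWhile_subset _ hc
    have h2 : c ∈ suf := by rw [hsufsplit]; exact List.mem_append_left _ h1
    exact List.mem_append_right _ (List.mem_cons_of_mem _ h2)
  -- the backward while loop stops at the last non-space character
  have hulast : (pre ++ '=' :: str).getLast? ≠ some ' ' :=
    pv_getLast_append pre ('=' :: str) (List.cons_ne_nil _ _)
      (pv_getLast_cons '=' str (by decide) hstrlast)
  have hcsu : n.toList = (pre ++ '=' :: str) ++ List.replicate M ' ' := by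
    rw [hcs, hsufsplit]; simp
  have hulen : (pre ++ '=' :: str).length = pre.length + 1 + str.length := by simp; omega
  have hcslen : n.toList.length = pre.length + 1 + str.length + M := by
    rw [hcsu]; simp; omega
  have hlns : aLastNonSpace n.toList (n.toList.length - 1) = pre.length + str.length := by
    have h := pv_lastNonSpace (pre ++ '=' :: str) M (by simp) hulast M le_rfl
    rw [hulen] at h
    have h1 : n.toList.length - 1 = pre.length + 1 + str.length - 1 + M := by omega
    rw [h1, hcsu, h]
    omega
  rw [hlns]
  have hcnt : pre.length + str.length + 1 - (k + 1) = str.length := by omega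
  rw [hcnt]
  rw [pv_foldl_range' aStepChar n.toList str (List.replicate M ' ') (k + 1)
    ((pre ++ ['='], false)) (by rw [hdrop, hsufsplit])]
  rw [hstrsplit]
  rw [pv_foldl_unseen lead core (pre ++ ['=']) hcorehead hcoreprint]
  have hrl : (List.replicate lead ' ' ++ core).length = lead + core.length := by simp
  have e1 : (List.replicate lead ' ' ++ core).length - core.length = lead := by simp
  have e2 : suf.length - (List.replicate lead ' ' ++ core).length = M := by rw [hrl]; omega
  have e3 : n.toList.length - (pre.length + (List.replicate lead ' ' ++ core).length) - 1 = M := by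
    rw [hrl]; omega
  rw [e1, e2, e3]
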